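-- pv_equiv track=rewrite | github.com/cbell98/Helper_Functions | module10.py | solution
-- ===== SOURCE A (Python) =====
-- def f(n):
--     r = 1
--
--     for i in range(5000000):
--         r = ((r + n) * n) % 9973
--
--     return r
--
-- def solution(nums):
--     result = []
--
--     cache = {}
--
--     for n in nums:
--         if n not in cache:
--             cache[n] = f(n)
--
--         result.append(cache[n])
--
--     return result
-- ===== SOURCE B (Python) =====
-- def g(n):
--     K = 5000000
--     seen = {}
--     x = 1
--     i = 0
--     while i < K and x not in seen:
--         seen[x] = i
--         x = ((x + n) * n) % 9973
--         i += 1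
--     if i < K:
--         lam = i - seen[x]
--         for _ in range((K - i) % lam):
--             x = ((x + n) * n) % 9973
--     return x
--
-- def solution(nums):
--     result = []
--     cache = {}
--     for n in nums:
--         if n not in cache:
--             cache[n] = g(n)
--         result.append(cache[n])
--     return result
-- ===== Notes on version B (the rewrite author's own statement) =====
-- stated objective: faster
-- what changed: Instead of running the modular recurrence r=((r+n)*n)%9973 for all 5,000,000 steps, B detects the first repeated state (at most 9973 distinct states exist mod 9973), derives the cycle length, and jumps the remaining steps with modular period arithmetic.
import Mathlib
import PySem

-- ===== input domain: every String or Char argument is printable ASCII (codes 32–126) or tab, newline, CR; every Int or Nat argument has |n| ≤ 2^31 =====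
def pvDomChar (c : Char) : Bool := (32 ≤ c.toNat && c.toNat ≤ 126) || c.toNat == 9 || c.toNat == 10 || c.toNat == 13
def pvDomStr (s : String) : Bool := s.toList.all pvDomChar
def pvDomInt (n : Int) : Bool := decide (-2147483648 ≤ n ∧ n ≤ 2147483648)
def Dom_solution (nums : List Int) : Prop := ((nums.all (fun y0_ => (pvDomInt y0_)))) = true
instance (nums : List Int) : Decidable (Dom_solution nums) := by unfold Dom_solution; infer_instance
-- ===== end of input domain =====

-- B replaces the 5,000,000-step modular recurrence by cycle detection in the (at most 9973)
-- possible states plus a period-arithmetic jump: asymptotically faster, same exact values.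

-- ===== PORT A =====
-- f(n): run r = ((r + n) * n) % 9973 for 5000000 iterations starting from r = 1
def f (n : Int) : Int :=
  (PySem.List.pyRange 0 5000000 1).foldl (fun r _ => PySem.Int.mod ((r + n) * n) 9973) 1

def solution (nums : List Int) : List Int :=
  (nums.foldl (fun (s : List Int × PySem.Dict Int Int) n =>
      let cache := if s.2.contains n then s.2 else s.2.insert n (f n)
      (s.1 ++ [cache.getD n 0], cache))   -- cache[n]: the key is always present here
    ([], PySem.Dict.empty)).1

-- ===== PORT B =====
-- the 'while i < K and x not in seen' loop of g; fuel = K - i, so fuel 0 means i = K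
def gLoop (n : Int) : Nat → PySem.Dict Int Int → Int → Int → (PySem.Dict Int Int × Int × Int)
  | 0, seen, x, i => (seen, x, i)
  | fuel+1, seen, x, i =>
    if i < 5000000 ∧ seen.contains x = false then
      gLoop n fuel (seen.insert x i) (PySem.Int.mod ((x + n) * n) 9973) (i + 1)
    else (seen, x, i)

-- the code after the while loop: if a repeat was found before step K, jump by the period
def gPost (n : Int) (r : PySem.Dict Int Int × Int × Int) : Int :=
  if r.2.2 < 5000000 then
    (fun y => PySem.Int.mod ((y + n) * n) 9973)^[(PySem.Int.mod (5000000 - r.2.2) (r.2.2 - r.1.getD r.2.1 0)).toNat] r.2.1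
  else r.2.1

def g (n : Int) : Int := gPost n (gLoop n 5000000 PySem.Dict.empty 1 0)

def solution_alt (nums : List Int) : List Int :=
  (nums.foldl (fun (s : List Int × PySem.Dict Int Int) n =>
      let cache := if s.2.contains n then s.2 else s.2.insert n (g n)
      (s.1 ++ [cache.getD n 0], cache))
    ([], PySem.Dict.empty)).1

-- ===== PRECONDITION & SPEC =====
def Spec_solution (nums : List Int) (out : List Int) : Prop := out = solution_alt nums
instance (nums : List Int) (out : List Int) : Decidable (Spec_solution nums out) := by unfold Spec_solution; infer_instance

-- ===== CLAIM (what is proved, stated in full; the proofs are below) =====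
def Claim_equal_solution : Prop := ∀ (nums : List Int), Dom_solution nums → Spec_solution nums (solution nums)

-- ===== LEMMAS AND PROOFS =====

-- the one-step map both programs use
def S (n : Int) : Int → Int := fun r => PySem.Int.mod ((r + n) * n) 9973

-- a fold that ignores the list elements is an iterate
theorem foldl_const_iterate {α β : Type} (h : α → α) :
    ∀ (l : List β) (a : α), l.foldl (fun r _ => h r) a = h^[l.length] a := by
  intro l
  induction l with
  | nil => intro a; simp
  | cons b t ih =>
      intro a
      simp only [List.foldl_cons, List.length_cons, ih, Function.iterate_succ_apply]

theorem f_eq_iterate (n : Int) : f n = (S n)^[5000000] 1 := by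
  have h := foldl_const_iterate (S n) (PySem.List.pyRange 0 5000000 1) 1
  have hlen : (PySem.List.pyRange 0 5000000 1).length = 5000000 := by
    rw [PySem.List.length_pyRange_one]; rfl
  rw [hlen] at h
  exact h

-- once a value repeats with period lam (from index mu on), iterate indices can be reduced mod lam
theorem iterate_period {α : Type} (s : α → α) (x0 : α) (mu lam : Nat) (hl : 0 < lam)
    (hc : s^[mu + lam] x0 = s^[mu] x0) : ∀ t, s^[mu + t] x0 = s^[mu + t % lam] x0 := by
  intro t
  induction t using Nat.strong_induction_on with
  | _ t ih =>
    by_cases h : t < lam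
    · rw [Nat.mod_eq_of_lt h]
    · rw [not_lt] at h
      have h1 : mu + t = (t - lam) + (mu + lam) := by omega
      rw [h1, Function.iterate_add_apply, hc, ← Function.iterate_add_apply]
      have h2 : t - lam + mu = mu + (t - lam) := by omega
      rw [h2, ih (t - lam) (by omega), Nat.mod_eq_sub_mod h]

-- loop invariant: every entry of seen records a true (index, state) pair of the orbit
def OrbitInv (n : Int) (seen : PySem.Dict Int Int) (i : Int) : Prop :=
  ∀ y j, seen.get? y = some j → ∃ jn : Nat, j = (jn : Int) ∧ (jn : Int) < i ∧ y = (S n)^[jn] 1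

set_option maxRecDepth 4096 in
theorem gLoop_spec (n : Int) : ∀ (fuel : Nat) (seen : PySem.Dict Int Int) (x i : Int),
    0 ≤ i → i + (fuel : Int) = 5000000 → x = (S n)^[i.toNat] 1 → OrbitInv n seen i →
    gPost n (gLoop n fuel seen x i) = (S n)^[5000000] 1 := by
  intro fuel
  induction fuel with
  | zero =>
      intro seen x i h0 hK hx _
      have hi : i = 5000000 := by push_cast at hK; omega
      subst hi
      rw [show gLoop n 0 seen x 5000000 = (seen, x, 5000000) from rfl]
      rw [show gPost n (seen, x, 5000000) = x from by unfold gPost; rw [if_neg (lt_irrefl _)]]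
      rw [hx, show ((5000000:Int)).toNat = 5000000 from rfl]
  | succ fuel ih =>
      intro seen x i h0 hK hx hinv
      have hiK : i < 5000000 := by push_cast at hK; omega
      simp only [gLoop]
      by_cases hc : seen.contains x = false
      · rw [if_pos ⟨hiK, hc⟩]
        apply ih
        · omega
        · push_cast at hK ⊢; omega
        · have h1 : (i + 1).toNat = i.toNat + 1 := by omega
          rw [h1, Function.iterate_succ_apply', ← hx]; rfl
        · intro y j hj
          rw [PySem.Dict.get?_insert] at hj
          split at hj
          · rename_i hyx
            injection hj with hj
            refine ⟨i.toNat, by omega, by omega, ?_⟩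
            rw [hyx, hx]
          · obtain ⟨jn, e1, e2, e3⟩ := hinv y j hj
            exact ⟨jn, e1, by omega, e3⟩
      · rw [if_neg (by simp [hc])]
        have hct : seen.contains x = true := by revert hc; cases seen.contains x <;> simp
        have hsome : (seen.get? x).isSome := by rw [← PySem.Dict.contains_eq_isSome_get?]; exact hct
        obtain ⟨mu, hmu⟩ := Option.isSome_iff_exists.mp hsome
        obtain ⟨mun, hj1, hj2, hj3⟩ := hinv x mu hmu
        simp only [gPost]
        rw [if_pos hiK, PySem.Dict.getD_of_get?_eq_some seen 0 hmu]
        have hiN : (i.toNat : Int) = i := Int.toNat_of_nonneg h0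
        set iN := i.toNat with hiNdef
        have hmn : mun < iN := by omega
        set lamN := iN - mun with hlamdef
        have hl : 0 < lamN := by omega
        have hlamc : i - mu = (lamN : Int) := by omega
        have hi5 : iN ≤ 5000000 := by omega
        have hkc : (5000000 : Int) - i = ((5000000 - iN : Nat) : Int) := by omega
        set kN := 5000000 - iN with hkNdef
        rw [hlamc, hkc, PySem.Int.mod_natCast, Int.toNat_natCast]
        show (S n)^[kN % lamN] x = (S n)^[5000000] 1
        rw [hx, ← Function.iterate_add_apply]
        have hcyc : (S n)^[mun + lamN] 1 = (S n)^[mun] 1 := by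
          have e : mun + lamN = iN := by omega
          rw [e, ← hx, hj3]
        have hper := iterate_period (S n) 1 mun lamN hl hcyc
        have e1 : kN % lamN + iN = mun + (lamN + kN % lamN) := by omega
        have e2 : (5000000 : Nat) = mun + (lamN + kN) := by omega
        rw [e1, e2, hper (lamN + kN % lamN), hper (lamN + kN)]
        congr 1
        rw [Nat.add_mod_left, Nat.add_mod_left, Nat.mod_eq_of_lt (Nat.mod_lt _ hl)]

theorem g_eq_iterate (n : Int) : g n = (S n)^[5000000] 1 := by
  refine gLoop_spec n 5000000 PySem.Dict.empty 1 0 le_rfl (by norm_num) (by simp) ?_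
  intro y j h
  simp [PySem.Dict.get?_empty] at h

-- the memoising fold over nums is just List.map of the memoised function
theorem cache_fold (F : Int → Int) :
    ∀ (nums : List Int) (acc : List Int) (cache : PySem.Dict Int Int),
    (∀ k v, cache.get? k = some v → v = F k) →
    (nums.foldl (fun (s : List Int × PySem.Dict Int Int) n =>
        let cache := if s.2.contains n then s.2 else s.2.insert n (F n)
        (s.1 ++ [cache.getD n 0], cache)) (acc, cache)).1 = acc ++ nums.map F := by
  intro nums
  induction nums with
  | nil => intro acc cache _; simp
  | cons m t ih =>
      intro acc cache hc
      simp only [List.foldl_cons, List.map_cons]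
      cases hm : cache.contains m with
      | true =>
          have hsome : (cache.get? m).isSome := by
            rw [← PySem.Dict.contains_eq_isSome_get?]; exact hm
          obtain ⟨v, hv⟩ := Option.isSome_iff_exists.mp hsome
          have hgv : cache.getD m 0 = F m := by
            rw [PySem.Dict.getD_of_get?_eq_some cache 0 hv]; exact hc m v hv
          simp only [if_true]
          rw [hgv, ih (acc ++ [F m]) cache hc, List.append_assoc]
          rfl
      | false =>
          rw [if_neg Bool.false_ne_true]
          have hgv : (cache.insert m (F m)).getD m 0 = F m :=
            PySem.Dict.getD_insert_self cache m (F m) 0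
          have hc' : ∀ k v, (cache.insert m (F m)).get? k = some v → v = F k := by
            intro k v hv
            rw [PySem.Dict.get?_insert] at hv
            split at hv
            · rename_i hkm; injection hv with hv; rw [← hv, hkm]
            · exact hc k v hv
          rw [hgv, ih (acc ++ [F m]) (cache.insert m (F m)) hc', List.append_assoc]
          rfl

theorem solution_eq_map (nums : List Int) : solution nums = nums.map f := by
  have h := cache_fold f nums [] PySem.Dict.empty (by intro k v hv; simp [PySem.Dict.get?_empty] at hv)
  simpa [solution] using h

theorem solution_alt_eq_map (nums : List Int) : solution_alt nums = nums.map g := by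
  have h := cache_fold g nums [] PySem.Dict.empty (by intro k v hv; simp [PySem.Dict.get?_empty] at hv)
  simpa [solution_alt] using h

-- ===== VERDICT (by name: the statement is the Claim_ definition above) =====
theorem solution_spec : Claim_equal_solution := by
  intro nums _
  unfold Spec_solution
  rw [solution_eq_map, solution_alt_eq_map]
  apply List.map_congr_left
  intro n _
  rw [f_eq_iterate, g_eq_iterate]
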